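-- pv_equiv track=rewrite | github.com/miliar/Code_Jam_Webscraper | solutions_python/solutions_year17_round0_nr1/3485.py | flip_string
-- ===== SOURCE A (Python) =====
-- def flip_string(s,strt,end):
--     new_str = ""
--     for i in range(len(s)):
--         if i>=strt and i<end:
--             if s[i]=='+':
--                 new_str+='-'
--             else:
--                 new_str += '+'
--         else:
--             new_str+=s[i]
--     return new_str
-- ===== SOURCE B (Python) =====
-- def flip_string(s, strt, end):
--     n = len(s)
--     lo = max(0, min(strt, n))
--     hi = max(lo, min(end, n))
--     mid = ''.join('-' if c == '+' else '+' for c in s[lo:hi])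
--     return s[:lo] + mid + s[hi:]
-- ===== Notes on version B (the rewrite author's own statement) =====
-- stated objective: simpler
-- what changed: Replaced the per-index loop that tests i>=strt and i<end for every character and grows the result by string concatenation with a three-region decomposition: clamp the bounds once, keep the prefix and suffix slices verbatim, and map only the middle slice through the '+'/'-' swap (bulk slicing/join instead of per-char += gives a constant-factor speedup).
import Mathlib
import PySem

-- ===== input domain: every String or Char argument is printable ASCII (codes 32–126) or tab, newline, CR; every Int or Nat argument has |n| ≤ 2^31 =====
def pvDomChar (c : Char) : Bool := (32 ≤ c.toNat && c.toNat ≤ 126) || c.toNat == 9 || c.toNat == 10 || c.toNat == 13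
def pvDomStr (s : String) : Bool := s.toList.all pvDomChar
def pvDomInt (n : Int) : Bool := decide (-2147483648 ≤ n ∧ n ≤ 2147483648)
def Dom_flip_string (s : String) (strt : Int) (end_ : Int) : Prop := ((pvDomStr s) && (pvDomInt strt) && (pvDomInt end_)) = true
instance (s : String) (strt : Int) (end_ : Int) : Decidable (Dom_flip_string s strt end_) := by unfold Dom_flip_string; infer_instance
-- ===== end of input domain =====

-- B replaces A's per-index guarded loop by a three-region decomposition (prefix kept,
-- clamped middle slice mapped through the '+'↔'-' swap, suffix kept); objective: simpler.

-- ===== PORT A =====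
def flip_string (s : String) (strt : Int) (end_ : Int) : String :=
  let cs := s.toList
  let new_str : List Char :=
    (PySem.List.pyRange 0 (cs.length : Int) 1).foldl (fun acc i =>
      if strt ≤ i ∧ i < end_ then
        if PySem.List.pyGet? cs i = some '+' then acc ++ ['-'] else acc ++ ['+']
      else acc ++ (PySem.List.pyGet? cs i).toList) []
  String.mk new_str

-- ===== PORT B =====
def pvFlipChar (c : Char) : Char := if c = '+' then '-' else '+'

def flip_string_alt (s : String) (strt : Int) (end_ : Int) : String :=
  let cs := s.toList
  let n : Int := cs.length
  let lo : Int := max 0 (min strt n)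
  let hi : Int := max lo (min end_ n)
  let mid : List Char := (PySem.List.slice cs (some lo) (some hi)).map pvFlipChar
  String.mk (PySem.List.slice cs none (some lo) ++ mid ++ PySem.List.slice cs (some hi) none)

-- ===== PRECONDITION & SPEC =====
def Spec_flip_string (s : String) (strt : Int) (end_ : Int) (out : String) : Prop := out = flip_string_alt s strt end_
instance (s : String) (strt : Int) (end_ : Int) (out : String) : Decidable (Spec_flip_string s strt end_ out) := by unfold Spec_flip_string; infer_instance

-- ===== CLAIM (what is proved, stated in full; the proofs are below) =====
def Claim_equal_flip_string : Prop := ∀ (s : String) (strt : Int) (end_ : Int), Dom_flip_string s strt end_ → Spec_flip_string s strt end_ (flip_string s strt end_)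

-- ===== LEMMAS AND PROOFS =====

-- A's loop body rewritten into 'acc ++ g i' shape (same values, branch by branch)
lemma pv_body_eq (cs : List Char) (strt end_ : Int) :
    (fun (acc : List Char) (i : Int) =>
      if strt ≤ i ∧ i < end_ then
        if PySem.List.pyGet? cs i = some '+' then acc ++ ['-'] else acc ++ ['+']
      else acc ++ (PySem.List.pyGet? cs i).toList)
    = (fun acc i => acc ++
        (if strt ≤ i ∧ i < end_ then
          if PySem.List.pyGet? cs i = some '+' then ['-'] else ['+']
        else (PySem.List.pyGet? cs i).toList)) := by
  funext acc i; split_ifs <;> rfl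

-- A's loop, as a pointwise map over positions
lemma pv_A_eq_map (cs : List Char) (strt end_ : Int) :
    (PySem.List.pyRange 0 (cs.length : Int) 1).foldl (fun acc i =>
      if strt ≤ i ∧ i < end_ then
        if PySem.List.pyGet? cs i = some '+' then acc ++ ['-'] else acc ++ ['+']
      else acc ++ (PySem.List.pyGet? cs i).toList) []
    = (List.range cs.length).map (fun (j : Nat) =>
        if strt ≤ (j : Int) ∧ (j : Int) < end_ then pvFlipChar (cs.getD j ' ') else cs.getD j ' ') := by
  rw [pv_body_eq, PySem.List.foldl_append_eq_flatMap, PySem.List.pyRange_zero_natCast,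
      List.flatMap_map, List.nil_append]
  have hcongr : ∀ j ∈ List.range cs.length,
      (if strt ≤ ((j : Nat) : Int) ∧ ((j : Nat) : Int) < end_ then
        if PySem.List.pyGet? cs ((j : Nat) : Int) = some '+' then ['-'] else ['+']
      else (PySem.List.pyGet? cs ((j : Nat) : Int)).toList)
      = [if strt ≤ (j : Int) ∧ (j : Int) < end_ then pvFlipChar (cs.getD j ' ') else cs.getD j ' '] := by
    intro j hj
    rw [List.mem_range] at hj
    have hget : PySem.List.pyGet? cs ((j : Nat) : Int) = some (cs.getD j ' ') := by
      rw [PySem.List.pyGet?_natCast, List.getElem?_eq_getElem hj, List.getD_eq_getElem?_getD,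
          List.getElem?_eq_getElem hj]
      rfl
    rw [hget]
    by_cases h1 : strt ≤ (j : Int) ∧ (j : Int) < end_
    · simp only [if_pos h1, pvFlipChar]
      by_cases h2 : cs.getD j ' ' = '+'
      · rw [if_pos (by rw [h2]), if_pos h2]
      · rw [if_neg (by simpa using h2), if_neg h2]
    · simp only [if_neg h1, Option.toList_some]
  calc (List.range cs.length).flatMap _
      = (List.range cs.length).flatMap (fun (j : Nat) =>
          [if strt ≤ (j : Int) ∧ (j : Int) < end_ then pvFlipChar (cs.getD j ' ') else cs.getD j ' ']) :=
        List.flatMap_congr hcongr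
    _ = _ := (List.map_eq_flatMap).symm

-- the two result lists are equal
lemma pv_lists_eq (cs : List Char) (strt end_ : Int) :
    (List.range cs.length).map (fun (j : Nat) =>
        if strt ≤ (j : Int) ∧ (j : Int) < end_ then pvFlipChar (cs.getD j ' ') else cs.getD j ' ')
    = PySem.List.slice cs none (some (max 0 (min strt (cs.length : Int))))
      ++ (PySem.List.slice cs (some (max 0 (min strt (cs.length : Int))))
            (some (max (max 0 (min strt (cs.length : Int))) (min end_ (cs.length : Int))))).map pvFlipChar
      ++ PySem.List.slice cs (some (max (max 0 (min strt (cs.length : Int))) (min end_ (cs.length : Int)))) none := by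
  set n := cs.length with hn
  set lo : Int := max 0 (min strt (n : Int)) with hlo
  set hi : Int := max lo (min end_ (n : Int)) with hhi
  have hlo0 : 0 ≤ lo := le_max_left _ _
  have hhilo : lo ≤ hi := le_max_left _ _
  have hlon : lo ≤ (n : Int) := by omega
  have hhin : hi ≤ (n : Int) := by omega
  have ha : lo = ((lo.toNat : Nat) : Int) := (Int.toNat_of_nonneg hlo0).symm
  have hb : hi = ((hi.toNat : Nat) : Int) := (Int.toNat_of_nonneg (le_trans hlo0 hhilo)).symm
  set a := lo.toNat with hadef
  set b := hi.toNat with hbdef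
  have hab : a ≤ b := by omega
  have hbn : b ≤ n := by omega
  rw [ha, hb, PySem.List.slice_to_natCast, PySem.List.slice_natCast, PySem.List.slice_from_natCast]
  apply List.ext_getElem
  · simp only [List.length_map, List.length_range, List.length_append, List.length_take,
      List.length_drop]
    omega
  · intro j hj1 hj2
    have hjn : j < n := by simpa using hj1
    simp only [List.getElem_map, List.getElem_range]
    have hgd : cs.getD j ' ' = cs[j]'(by omega) := by
      rw [List.getD_eq_getElem?_getD, List.getElem?_eq_getElem (by omega : j < cs.length)]; rfl
    rw [hgd]
    simp only [List.getElem_append, List.length_append, List.length_take, List.length_map,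
      List.length_drop, List.getElem_map, List.getElem_take, List.getElem_drop]
    split_ifs <;>
      first
        | omega
        | rfl
        | (congr 1 <;> omega)
        | (congr 1 <;> congr 1 <;> omega)

-- ===== VERDICT (by name: the statement is the Claim_ definition above) =====
theorem flip_string_spec : Claim_equal_flip_string := by
  intro s strt end_ _
  show flip_string s strt end_ = flip_string_alt s strt end_
  unfold flip_string flip_string_alt
  simp only [pv_A_eq_map, pv_lists_eq]
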